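-- pv_equiv track=rewrite | github.com/jwsearle18/bioinformatics_algorithms | src/lesson_6/burrows_wheeler_matching.py | create_occurance_list
-- ===== SOURCE A (Python) =====
-- from typing import List, Dict, Iterable, Tuple
--
-- def create_occurance_list(text: str) -> List[Tuple[str, int]]:
--     """
--     Creates a list of occurrences of each character in a string.
--
--     Args:
--         text: The string to process.
--
--     Returns:
--         A list of tuples, where each tuple contains a character and its occurrence number.
--     """
--     occurance_list = []
--     char_occurances = {}
--     for char in text:
--         if char not in char_occurances:
--             char_occurances[char] = 1
--         else:
--             char_occurances[char] += 1
--         num_occurance = char_occurances[char]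
--         occurance_list.append((char, num_occurance))
--     return occurance_list
-- ===== SOURCE B (Python) =====
-- def create_occurance_list(text):
--     """Two phases instead of one interleaved pass: group the indices of each
--     character, then assign ranks (1-based) into a pre-allocated result."""
--     positions = {}
--     for i, ch in enumerate(text):
--         positions.setdefault(ch, []).append(i)
--     result = [None] * len(text)
--     for ch, pos in positions.items():
--         for rank, p in enumerate(pos, 1):
--             result[p] = (ch, rank)
--     return result
-- ===== Notes on version B (the rewrite author's own statement) =====
-- stated objective: alternative
-- what changed: Replaces the single interleaved pass with a running-count dict by two phases: first group the indices of each character into a char->positions dict, then assign each position its 1-based rank by enumerating each group into a pre-allocated result list.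
import Mathlib
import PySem

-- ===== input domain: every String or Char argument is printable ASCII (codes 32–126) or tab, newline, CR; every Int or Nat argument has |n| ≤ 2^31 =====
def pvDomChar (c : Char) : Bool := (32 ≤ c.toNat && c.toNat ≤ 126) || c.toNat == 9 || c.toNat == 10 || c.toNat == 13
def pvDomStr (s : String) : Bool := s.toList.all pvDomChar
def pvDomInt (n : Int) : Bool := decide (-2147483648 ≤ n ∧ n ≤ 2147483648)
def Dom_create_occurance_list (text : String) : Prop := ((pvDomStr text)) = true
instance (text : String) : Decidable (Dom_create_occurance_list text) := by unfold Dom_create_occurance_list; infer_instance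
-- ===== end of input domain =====

-- B replaces A's interleaved running-count pass by two phases: group the indices of each
-- character, then assign 1-based ranks into a pre-allocated result (objective: alternative).

-- ===== PORT A =====
-- one fold carrying (occurance_list, char_occurances); a Python char is a 1-char String in the output
def create_occurance_list (text : String) : List (String × Int) :=
  (text.toList.foldl
    (fun (st : List (String × Int) × PySem.Dict Char Int) char =>
      let d := if st.2.contains char = false
               then st.2.insert char 1
               else st.2.modify char 0 (· + 1)
      let num_occurance := d.getD char 0
      (st.1 ++ [(String.ofList [char], num_occurance)], d))
    ([], PySem.Dict.empty)).1

-- ===== PORT B =====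
-- positions.setdefault(ch, []).append(i) is positions[ch] = positions.get(ch, []) + [i], i.e. Dict.modify;
-- result = [None]*len(text) is a List of Options; result[p] = (ch, rank) sets a stored index p (0 ≤ p < len,
-- so .toNat is exact); every cell is filled by the two loops, the final map strips the Option wrapper.
def create_occurance_list_alt (text : String) : List (String × Int) :=
  (((PySem.List.enumerate text.toList).foldl
      (fun d ic => d.modify ic.2 [] (fun v => v ++ [ic.1])) PySem.Dict.empty).items.foldl
    (fun res kv =>
      (PySem.List.enumerate kv.2 1).foldl
        (fun res rp => res.set rp.2.toNat (some (String.ofList [kv.1], rp.1))) res)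
    (List.replicate text.toList.length none)).map
      (fun o => o.getD (String.ofList [], 0))

-- ===== PRECONDITION & SPEC =====
def Spec_create_occurance_list (text : String) (out : List (String × Int)) : Prop := out = create_occurance_list_alt text
instance (text : String) (out : List (String × Int)) : Decidable (Spec_create_occurance_list text out) := by unfold Spec_create_occurance_list; infer_instance

-- ===== CLAIM (what is proved, stated in full; the proofs are below) =====
def Claim_equal_create_occurance_list : Prop := ∀ (text : String), Dom_create_occurance_list text → Spec_create_occurance_list text (create_occurance_list text)

-- ===== LEMMAS AND PROOFS =====

/-- reference: ranks of `l` given the already-seen prefix `p` -/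
def specList (p l : List Char) : List (String × Int) :=
  match l with
  | [] => []
  | c :: t => (String.ofList [c], (p.count c : Int) + 1) :: specList (p ++ [c]) t

lemma A_eq (l : List Char) : ∀ (p : List Char) (acc : List (String × Int))
    (d : PySem.Dict Char Int),
    (∀ c, d.contains c = decide (p.count c ≠ 0)) →
    (∀ c, d.getD c 0 = (p.count c : Int)) →
    (l.foldl
      (fun (st : List (String × Int) × PySem.Dict Char Int) char =>
        let d := if st.2.contains char = false
                 then st.2.insert char 1
                 else st.2.modify char 0 (· + 1)
        let num_occurance := d.getD char 0
        (st.1 ++ [(String.ofList [char], num_occurance)], d))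
      (acc, d)).1 = acc ++ specList p l := by
  induction l with
  | nil => intro p acc d _ _; simp [specList]
  | cons c t ih =>
    intro p acc d hcon hget
    simp only [List.foldl_cons]
    by_cases h0 : p.count c = 0
    · have hc : d.contains c = false := by simp [hcon, h0]
      rw [ih (p ++ [c])]
      · simp [specList, hc, h0, List.append_assoc]
      · intro c'
        by_cases hcc : c' = c
        · subst hcc; simp [hc, List.count_append]
        · have hcc' : ¬ c = c' := fun h => hcc h.symm
          simp [hc, PySem.Dict.contains_insert, hcon, List.count_append, hcc, hcc']
      · intro c'
        by_cases hcc : c' = c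
        · subst hcc; simp [hc, List.count_append, h0]
        · have hcc' : ¬ c = c' := fun h => hcc h.symm
          simp [hc, PySem.Dict.getD_insert, hget, List.count_append, hcc, hcc']
    · have hc : d.contains c = true := by simp [hcon, h0]
      rw [ih (p ++ [c])]
      · simp [specList, hc, hget, List.append_assoc]
      · intro c'
        by_cases hcc : c' = c
        · subst hcc; simp [hc, PySem.Dict.contains_modify, List.count_append]
        · have hcc' : ¬ c = c' := fun h => hcc h.symm
          simp [hc, PySem.Dict.contains_modify, hcon, List.count_append, hcc, hcc']
      · intro c'
        by_cases hcc : c' = c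
        · subst hcc; simp [hc, hget, List.count_append]
        · have hcc' : ¬ c = c' := fun h => hcc h.symm
          simp [hc, PySem.Dict.getD_modify, hget, List.count_append, hcc, hcc']

lemma length_specList : ∀ (l p : List Char), (specList p l).length = l.length := by
  intro l
  induction l with
  | nil => intro p; simp [specList]
  | cons c t ih => intro p; simp [specList, ih]

lemma getElem?_specList : ∀ (l p : List Char) (j : Nat) (h : j < l.length),
    (specList p l)[j]? =
      some (String.ofList [l[j]], (((p ++ l.take (j + 1)).count l[j] : Nat) : Int)) := by
  intro l
  induction l with
  | nil => intro p j h; simp at h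
  | cons c t ih =>
    intro p j h
    cases j with
    | zero => simp [specList, List.count_append]
    | succ k =>
      have hk : k < t.length := by simpa using h
      simp only [specList, List.getElem?_cons_succ, List.getElem_cons_succ]
      rw [ih (p ++ [c]) k hk]
      simp [List.append_assoc]

/-- positions of `c` in `l`, from index `s` upwards, as the port's dict holds them -/
def occL (l : List Char) (s : Int) (c : Char) : List Int :=
  ((PySem.List.enumerate l s).filter (fun ic => ic.2 == c)).map (fun ic => ic.1)

lemma mem_occL (l : List Char) (s : Int) (c : Char) (m : Int) (hm : m ∈ occL l s c) :
    ∃ j : Nat, ∃ _ : j < l.length, l[j] = c ∧ m = s + j := by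
  unfold occL at hm
  obtain ⟨ic, hic, hm⟩ := List.mem_map.mp hm
  obtain ⟨hicmem, hicc⟩ := List.mem_filter.mp hic
  obtain ⟨k, hk, hkeq⟩ := (PySem.List.mem_enumerate_iff _ _ _).mp hicmem
  subst hkeq
  exact ⟨k, hk, by simpa using hicc, by simpa using hm.symm⟩

lemma pairwise_occL (l : List Char) (s : Int) (c : Char) :
    (occL l s c).Pairwise (· < ·) := by
  unfold occL
  exact List.Pairwise.map _ (fun _ _ h => h)
    (List.Pairwise.filter _ (PySem.List.pairwise_lt_enumerate l s))

lemma getElem?_occL_count : ∀ (l : List Char) (j : Nat) (s : Int) (c : Char)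
    (hj : j < l.length), l[j] = c → (occL l s c)[(l.take j).count c]? = some (s + j) := by
  intro l
  induction l with
  | nil => intro j s c h _; simp at h
  | cons x t ih =>
    intro j s c hj hc
    cases j with
    | zero =>
      simp only [List.getElem_cons_zero] at hc
      subst hc
      simp [occL, PySem.List.enumerate_cons]
    | succ k =>
      have hk : k < t.length := by simpa using hj
      simp only [List.getElem_cons_succ] at hc
      by_cases hx : x = c
      · subst hx
        have hocc : occL (x :: t) s x = (s : Int) :: occL t (s + 1) x := by
          simp [occL, PySem.List.enumerate_cons]
        have hcnt : ((x :: t).take (k + 1)).count x = (t.take k).count x + 1 := by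
          simp
        rw [hocc, hcnt, List.getElem?_cons_succ, ih k (s + 1) x hk hc]
        congr 1
        push_cast
        ring
      · have hocc : occL (x :: t) s c = occL t (s + 1) c := by
          simp [occL, PySem.List.enumerate_cons, hx]
        have hcnt : ((x :: t).take (k + 1)).count c = (t.take k).count c := by
          simp [hx]
        rw [hocc, hcnt, ih k (s + 1) c hk hc]
        congr 1
        push_cast
        ring

/-- the dict the port's first phase builds -/
def posDict (l : List Char) : PySem.Dict Char (List Int) :=
  (PySem.List.enumerate l).foldl
    (fun d ic => d.modify ic.2 [] (fun v => v ++ [ic.1])) PySem.Dict.empty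

lemma posDict_getD (l : List Char) (c : Char) : (posDict l).getD c [] = occL l 0 c := by
  unfold posDict occL
  have hswap : (PySem.List.enumerate l).foldl
      (fun d ic => d.modify ic.2 [] (fun v => v ++ [ic.1])) PySem.Dict.empty
      = ((PySem.List.enumerate l).map Prod.swap).foldl
          (fun d p => d.modify p.1 [] (fun v => v ++ [p.2])) PySem.Dict.empty := by
    rw [List.foldl_map]
    exact PySem.List.foldl_congr_mem _ _ _ _ (fun acc ic _ => rfl)
  rw [hswap, PySem.Dict.getD_foldl_modify_append]
  simp [List.filter_map, List.map_map, Function.comp_def]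

lemma posDict_keys (l : List Char) : (posDict l).keys = PySem.Set.ofList l := by
  unfold posDict
  rw [PySem.Dict.keys_foldl_modify_key (PySem.List.enumerate l) (fun ic => ic.2) []
      (fun _ ic => fun v => v ++ [ic.1]) PySem.Dict.empty]
  simp [PySem.Dict.keys_empty, PySem.List.map_snd_enumerate, PySem.Set.update_nil_left]

lemma posDict_nodup (l : List Char) : (posDict l).keys.Nodup := by
  rw [posDict_keys]
  exact PySem.Set.nodup_ofList l

/-- the per-character block of (position, value) assignments of the second phase -/
def blockOf (l : List Char) (c : Char) : List (Int × Option (String × Int)) :=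
  (PySem.List.enumerate (occL l 0 c) 1).map
    (fun rp => (rp.2, some (String.ofList [c], rp.1)))

/-- all assignments, flattened in execution order -/
def asgn (l : List Char) : List (Int × Option (String × Int)) :=
  (PySem.Set.ofList l).flatMap (fun c => blockOf l c)

def fillRes (l : List Char) : List (Option (String × Int)) :=
  (asgn l).foldl (fun res a => res.set a.1.toNat a.2) (List.replicate l.length none)

lemma alt_eq_fill (text : String) :
    create_occurance_list_alt text
      = (fillRes text.toList).map (fun o => o.getD (String.ofList [], 0)) := by
  unfold create_occurance_list_alt fillRes asgn
  congr 1
  have hitems : (posDict text.toList).items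
      = (PySem.Set.ofList text.toList).map (fun c => (c, occL text.toList 0 c)) := by
    rw [PySem.Dict.items_eq_map_keys (posDict text.toList) (posDict_nodup text.toList) []]
    rw [posDict_keys]
    exact List.map_congr_left (fun c _ => by rw [posDict_getD])
  show (posDict text.toList).items.foldl _ _ = _
  rw [hitems, List.foldl_map, List.foldl_flatMap]
  exact PySem.List.foldl_congr_mem _ _ _ _
    (fun res c _ => by unfold blockOf; rw [List.foldl_map])

lemma length_foldl_set {β : Type} (as : List (Int × β)) :
    ∀ (res : List β), (as.foldl (fun r a => r.set a.1.toNat a.2) res).length = res.length := by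
  induction as with
  | nil => intro res; simp
  | cons a t ih => intro res; simp [ih, List.length_set]

lemma getElem?_foldl_set_of_ne {β : Type} (as : List (Int × β)) :
    ∀ (res : List β) (j : Nat), (∀ a ∈ as, a.1.toNat ≠ j) →
      (as.foldl (fun r a => r.set a.1.toNat a.2) res)[j]? = res[j]? := by
  induction as with
  | nil => intro res j _; simp
  | cons a t ih =>
    intro res j h
    simp only [List.foldl_cons]
    rw [ih _ j (fun b hb => h b (List.mem_cons_of_mem a hb))]
    exact List.getElem?_set_ne (h a List.mem_cons_self)

lemma fill_getElem? (l : List Char) (j : Nat) (hj : j < l.length) :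
    (fillRes l)[j]? = some (some (String.ofList [l[j]],
      (((l.take (j + 1)).count l[j] : Nat) : Int))) := by
  have hmemc : l[j] ∈ PySem.Set.ofList l := (PySem.Set.mem_ofList l l[j]).mpr (List.getElem_mem hj)
  obtain ⟨s, t, hst⟩ := List.append_of_mem hmemc
  have hnd : (PySem.Set.ofList l).Nodup := PySem.Set.nodup_ofList l
  rw [hst] at hnd
  have hcnot : l[j] ∉ s ++ t := (List.nodup_cons.mp (List.nodup_middle.mp hnd)).1
  have hct : ∀ c' ∈ t, c' ≠ l[j] := by
    intro c' h hcc
    exact hcnot (by rw [← hcc]; exact List.mem_append_right _ h)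
  -- where the k-th (0-based) occurrence of l[j] sits
  have hocck : (occL l 0 l[j])[(l.take j).count l[j]]? = some ((0 : Int) + j) :=
    getElem?_occL_count l j 0 l[j] hj rfl
  obtain ⟨hklt, hockval⟩ := List.getElem?_eq_some_iff.mp hocck
  have hkltB : (l.take j).count l[j] < (blockOf l l[j]).length := by
    simpa [blockOf, PySem.List.length_enumerate] using hklt
  have hBk : (blockOf l l[j])[(l.take j).count l[j]] =
      ((j : Int), some (String.ofList [l[j]], 1 + ((l.take j).count l[j] : Int))) := by
    simp only [blockOf, List.getElem_map,
      PySem.List.getElem_enumerate _ _ _ (by simpa [PySem.List.length_enumerate] using hklt)]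
    rw [hockval]
    simp
  have hsplit : blockOf l l[j] = (blockOf l l[j]).take ((l.take j).count l[j])
      ++ (blockOf l l[j])[(l.take j).count l[j]] :: (blockOf l l[j]).drop ((l.take j).count l[j] + 1) := by
    rw [← List.drop_eq_getElem_cons hkltB, List.take_append_drop]
  have hmid : blockOf l l[j] ++ t.flatMap (fun c => blockOf l c)
      = (blockOf l l[j]).take ((l.take j).count l[j])
        ++ (blockOf l l[j])[(l.take j).count l[j]] ::
          ((blockOf l l[j]).drop ((l.take j).count l[j] + 1) ++ t.flatMap (fun c => blockOf l c)) := by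
    conv_lhs => rw [hsplit]
    simp only [List.append_assoc, List.cons_append]
  have hasgn2 : asgn l = (s.flatMap (fun c => blockOf l c) ++ (blockOf l l[j]).take ((l.take j).count l[j]))
      ++ (blockOf l l[j])[(l.take j).count l[j]] ::
        ((blockOf l l[j]).drop ((l.take j).count l[j] + 1) ++ t.flatMap (fun c => blockOf l c)) := by
    rw [asgn, hst, List.flatMap_append, List.flatMap_cons, hmid, List.append_assoc]
  rw [fillRes, hasgn2, List.foldl_append, List.foldl_cons, hBk]
  rw [getElem?_foldl_set_of_ne]
  · have hlen : (((s.flatMap (fun c => blockOf l c) ++ (blockOf l l[j]).take ((l.take j).count l[j]))).foldl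
        (fun r a => r.set a.1.toNat a.2) (List.replicate l.length none)).length = l.length := by
      rw [length_foldl_set, List.length_replicate]
    simp only [Int.toNat_natCast]
    rw [List.getElem?_set_self (by rw [hlen]; exact hj)]
    have hcnt : (l.take (j + 1)).count l[j] = (l.take j).count l[j] + 1 := by
      rw [List.take_add_one, List.getElem?_eq_getElem hj, List.count_append]
      simp
    have hval : (1 : Int) + ((l.take j).count l[j] : Int)
        = (((l.take (j + 1)).count l[j] : Nat) : Int) := by
      rw [hcnt]; push_cast; ring
    rw [hval]
  · -- nothing after the k-th assignment of block l[j] touches index j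
    intro a ha habs
    rcases List.mem_append.mp ha with hdrop | htpart
    · obtain ⟨i, hi, haeq⟩ := List.mem_iff_getElem.mp hdrop
      rw [List.getElem_drop] at haeq
      have hlt : ((l.take j).count l[j]) + 1 + i < (blockOf l l[j]).length := by
        have := hi
        simp only [List.length_drop] at this
        omega
      have ha1 : a.1 = (occL l 0 l[j])[(l.take j).count l[j] + 1 + i]'(by
          simpa [blockOf, PySem.List.length_enumerate] using hlt) := by
        rw [← haeq]
        simp only [blockOf, List.getElem_map]
        rw [PySem.List.getElem_enumerate _ _ _ (by simpa [blockOf] using hlt)]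
      have hgt : ((j : Int)) < a.1 := by
        rw [ha1]
        have := List.pairwise_iff_getElem.mp (pairwise_occL l 0 l[j])
          ((l.take j).count l[j]) ((l.take j).count l[j] + 1 + i) hklt
          (by simpa [blockOf, PySem.List.length_enumerate] using hlt) (by omega)
        rw [hockval] at this
        simpa using this
      omega
    · obtain ⟨c', hc't, hablock⟩ := List.mem_flatMap.mp htpart
      obtain ⟨rp, hrp, haeq⟩ := List.mem_map.mp hablock
      have h1 : rp.2 ∈ occL l 0 c' := by
        obtain ⟨k', hk', hrpeq⟩ := (PySem.List.mem_enumerate_iff _ _ _).mp hrp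
        subst hrpeq
        exact List.getElem_mem hk'
      obtain ⟨j', hj', hcj', hmj'⟩ := mem_occL l 0 c' rp.2 h1
      have ha1 : a.1 = rp.2 := by rw [← haeq]
      have hjj : j' = j := by omega
      subst hjj
      exact hct c' hc't (by rw [← hcj'])

-- ===== VERDICT (by name: the statement is the Claim_ definition above) =====
theorem create_occurance_list_spec : Claim_equal_create_occurance_list := by
  intro text _
  unfold Spec_create_occurance_list create_occurance_list
  rw [A_eq text.toList [] [] PySem.Dict.empty (by simp) (by simp), List.nil_append,
    alt_eq_fill]
  apply List.ext_getElem?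
  intro j
  by_cases hj : j < text.toList.length
  · rw [getElem?_specList text.toList [] j hj, List.getElem?_map, fill_getElem? _ j hj]
    simp
  · have h1 : (specList [] text.toList).length ≤ j := by
      rw [length_specList]; omega
    have h2 : ((fillRes text.toList).map (fun o => o.getD (String.ofList [], 0))).length ≤ j := by
      rw [List.length_map]
      unfold fillRes
      rw [length_foldl_set, List.length_replicate]
      omega
    rw [List.getElem?_eq_none h1, List.getElem?_eq_none h2]
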